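-- pv_equiv track=rewrite | github.com/jamesben6688/coding | swipe_line/time_summation.py | merge_timeseries_sum
-- ===== SOURCE A (Python) =====
-- def merge_timeseries_sum(T1, T2):
--     # 所有的变化时间点
--     time_points = set([t for t, _ in T1] + [t for t, _ in T2])
--     time_points = sorted(time_points)
--
--     # 将原始序列变成 dict，方便查找
--     t1_map = dict(T1)
--     t2_map = dict(T2)
--
--     result = []
--     curr_val_t1 = 0
--     curr_val_t2 = 0
--     prev_total = None
--
--     for t in time_points:
--         if t in t1_map:
--             curr_val_t1 = t1_map[t]
--         if t in t2_map:
--             curr_val_t2 = t2_map[t]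
--         total = curr_val_t1 + curr_val_t2
--         if prev_total != total:
--             result.append([t, total])
--             prev_total = total
--
--     return result
-- ===== SOURCE B (Python) =====
-- def merge_timeseries_sum(T1, T2):
--     def val_at(series, t):
--         # value of the last pair whose timestamp is the largest timestamp <= t (0 if none)
--         best = None
--         v = 0
--         for ts, x in series:
--             if ts <= t and (best is None or ts >= best):
--                 best = ts
--                 v = x
--         return v
--
--     times = sorted(set([t for t, _ in T1] + [t for t, _ in T2]))
--     out = []
--     for t in times:
--         total = val_at(T1, t) + val_at(T2, t)
--         if not out or out[-1][1] != total:
--             out.append([t, total])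
--     return out
-- ===== Notes on version B (the rewrite author's own statement) =====
-- stated objective: alternative
-- what changed: B drops A's two dicts and the carried per-series state: it recomputes, at each sorted change point t, the last value with timestamp <= t by a direct scan of each series, and dedupes against the last emitted row instead of a prev_total variable.
import Mathlib
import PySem

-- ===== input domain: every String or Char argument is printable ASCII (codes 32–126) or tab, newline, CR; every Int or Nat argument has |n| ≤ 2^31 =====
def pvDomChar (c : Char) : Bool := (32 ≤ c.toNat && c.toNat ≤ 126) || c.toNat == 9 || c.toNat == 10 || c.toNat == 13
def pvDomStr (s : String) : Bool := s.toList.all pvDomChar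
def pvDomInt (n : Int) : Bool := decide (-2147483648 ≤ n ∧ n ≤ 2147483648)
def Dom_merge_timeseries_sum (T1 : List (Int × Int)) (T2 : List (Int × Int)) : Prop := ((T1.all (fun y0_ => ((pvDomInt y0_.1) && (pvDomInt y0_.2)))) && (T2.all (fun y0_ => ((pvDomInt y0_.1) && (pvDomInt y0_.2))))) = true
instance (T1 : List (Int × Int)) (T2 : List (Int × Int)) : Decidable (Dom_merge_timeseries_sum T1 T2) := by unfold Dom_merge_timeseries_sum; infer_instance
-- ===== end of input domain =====

-- B replaces A's two dicts and carried per-series state by recomputing, at each change point t,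
-- the last value with timestamp ≤ t by a direct scan of each series (objective: alternative).

-- ===== PORT A =====
-- loop body of A's 'for t in time_points' loop, as a named helper
def pvStepA (t1_map t2_map : PySem.Dict Int Int)
    (st : List (List Int) × Int × Int × Option Int) (t : Int) :
    List (List Int) × Int × Int × Option Int :=
  let cv1 := if t1_map.contains t then (t1_map.get? t).getD st.2.1 else st.2.1
  let cv2 := if t2_map.contains t then (t2_map.get? t).getD st.2.2.1 else st.2.2.1
  let total := cv1 + cv2
  if st.2.2.2 ≠ some total then (st.1 ++ [[t, total]], cv1, cv2, some total)
  else (st.1, cv1, cv2, st.2.2.2)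

def merge_timeseries_sum (T1 : List (Int × Int)) (T2 : List (Int × Int)) : List (List Int) :=
  let time_points : List Int :=
    PySem.List.sorted (PySem.Set.ofList (T1.map (fun p => p.1) ++ T2.map (fun p => p.1))) (fun x => x)
  let t1_map : PySem.Dict Int Int := PySem.Dict.ofList T1
  let t2_map : PySem.Dict Int Int := PySem.Dict.ofList T2
  (time_points.foldl (pvStepA t1_map t2_map) ([], 0, 0, none)).1

-- ===== PORT B =====
-- Source B's val_at: value of the last pair whose timestamp is the largest timestamp ≤ t (0 if none)
def pvValAt (series : List (Int × Int)) (t : Int) : Int :=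
  (series.foldl
    (fun (st : Option Int × Int) p =>
      if (decide (p.1 ≤ t) && (match st.1 with | none => true | some b => decide (b ≤ p.1))) then
        (some p.1, p.2)
      else st)
    (none, 0)).2

-- loop body of B's 'for t in times' loop
def pvStepB (T1 T2 : List (Int × Int)) (out : List (List Int)) (t : Int) : List (List Int) :=
  let total := pvValAt T1 t + pvValAt T2 t
  match PySem.List.pyGet? out (-1) with
  | none => out ++ [[t, total]]
  | some l => if PySem.List.pyGet? l 1 ≠ some total then out ++ [[t, total]] else out

def merge_timeseries_sum_alt (T1 : List (Int × Int)) (T2 : List (Int × Int)) : List (List Int) :=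
  let times : List Int :=
    PySem.List.sorted (PySem.Set.ofList (T1.map (fun p => p.1) ++ T2.map (fun p => p.1))) (fun x => x)
  times.foldl (pvStepB T1 T2) []

-- ===== PRECONDITION & SPEC =====
def Spec_merge_timeseries_sum (T1 : List (Int × Int)) (T2 : List (Int × Int)) (out : List (List Int)) : Prop := out = merge_timeseries_sum_alt T1 T2
instance (T1 : List (Int × Int)) (T2 : List (Int × Int)) (out : List (List Int)) : Decidable (Spec_merge_timeseries_sum T1 T2 out) := by unfold Spec_merge_timeseries_sum; infer_instance

-- ===== CLAIM (what is proved, stated in full; the proofs are below) =====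
def Claim_equal_merge_timeseries_sum : Prop := ∀ (T1 : List (Int × Int)) (T2 : List (Int × Int)), Dom_merge_timeseries_sum T1 T2 → Spec_merge_timeseries_sum T1 T2 (merge_timeseries_sum T1 T2)

-- ===== LEMMAS AND PROOFS =====

-- parametric form of Source B's inner scan (condition on the timestamp abstracted out)
def selStep (c : Int → Bool) (st : Option Int × Int) (p : Int × Int) : Option Int × Int :=
  if (c p.1 && (match st.1 with | none => true | some b => decide (b ≤ p.1))) then (some p.1, p.2)
  else st

def selFold (S : List (Int × Int)) (c : Int → Bool) (acc : Option Int × Int) : Option Int × Int :=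
  S.foldl (selStep c) acc

-- value at the LAST pair of S with timestamp t (default d)
def lastValD (S : List (Int × Int)) (t : Int) (d : Int) : Int :=
  S.foldl (fun a p => if p.1 = t then p.2 else a) d

def optLast (S : List (Int × Int)) (t : Int) (a : Option Int) : Option Int :=
  S.foldl (fun a p => if p.1 = t then some p.2 else a) a

lemma pvValAt_eq_selFold (S : List (Int × Int)) (t : Int) :
    pvValAt S t = (selFold S (fun ts => decide (ts ≤ t)) (none, 0)).2 := rfl

lemma selFold_congr (S : List (Int × Int)) (c c' : Int → Bool) (acc : Option Int × Int)
    (h : ∀ p ∈ S, c p.1 = c' p.1) : selFold S c acc = selFold S c' acc := by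
  induction S generalizing acc with
  | nil => rfl
  | cons p rest ih =>
      simp only [selFold, List.foldl_cons] at *
      rw [show selStep c acc p = selStep c' acc p by simp [selStep, h p (by simp)]]
      exact ih _ (fun q hq => h q (by simp [hq]))

lemma selFold_false (S : List (Int × Int)) (c : Int → Bool) (acc : Option Int × Int)
    (h : ∀ p ∈ S, c p.1 = false) : selFold S c acc = acc := by
  induction S generalizing acc with
  | nil => rfl
  | cons p rest ih =>
      simp only [selFold, List.foldl_cons] at *
      rw [show selStep c acc p = acc by simp [selStep, h p (by simp)]]
      exact ih _ (fun q hq => h q (by simp [hq]))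

lemma mem_fst_tail {p : Int × Int} {rest : List (Int × Int)} {t : Int}
    (hp : p.1 ≠ t) (h : t ∈ (p :: rest).map Prod.fst) : t ∈ rest.map Prod.fst := by
  simp only [List.map_cons, List.mem_cons] at h
  rcases h with h | h
  · exact absurd h.symm hp
  · exact h

lemma selFold_of_best (S : List (Int × Int)) (t : Int) (acc : Option Int × Int)
    (h : acc.1 = some t) :
    selFold S (fun ts => decide (ts ≤ t)) acc = (some t, lastValD S t acc.2) := by
  induction S generalizing acc with
  | nil =>
      obtain ⟨a1, a2⟩ := acc
      simp only at h; subst h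
      rfl
  | cons p rest ih =>
      obtain ⟨a1, a2⟩ := acc
      simp only at h; subst h
      by_cases hp : p.1 = t
      · subst hp
        have hstep : selStep (fun ts => decide (ts ≤ p.1)) (some p.1, a2) p = (some p.1, p.2) := by
          simp [selStep]
        rw [selFold, List.foldl_cons, hstep]
        have := ih (some p.1, p.2) rfl
        rw [selFold] at this
        rw [this]
        simp [lastValD]
      · have hstep : selStep (fun ts => decide (ts ≤ t)) (some t, a2) p = (some t, a2) := by
          simp only [selStep]
          have : ¬(p.1 ≤ t ∧ t ≤ p.1) := fun hc => hp (le_antisymm hc.1 hc.2)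
          by_cases h1 : p.1 ≤ t
          · have h2 : ¬ t ≤ p.1 := fun h2 => this ⟨h1, h2⟩
            simp [h2]
          · simp [h1]
        rw [selFold, List.foldl_cons, hstep]
        have := ih (some t, a2) rfl
        rw [selFold] at this
        rw [this]
        simp [lastValD, hp]

lemma selFold_mem (S : List (Int × Int)) (t : Int) (acc : Option Int × Int)
    (hacc : ∀ b, acc.1 = some b → b ≤ t) (hmem : t ∈ S.map Prod.fst) :
    selFold S (fun ts => decide (ts ≤ t)) acc = (some t, lastValD S t 0) := by
  induction S generalizing acc with
  | nil => simp at hmem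
  | cons p rest ih =>
      by_cases hp : p.1 = t
      · have hstep : selStep (fun ts => decide (ts ≤ t)) acc p = (some p.1, p.2) := by
          obtain ⟨a1, a2⟩ := acc
          cases a1 with
          | none => simp [selStep, hp]
          | some b => simp [selStep, hp, hacc b rfl]
        rw [selFold, List.foldl_cons, hstep]
        have h2 := selFold_of_best rest t (some p.1, p.2) (by simp [hp])
        rw [selFold] at h2
        rw [h2]
        simp [lastValD, hp]
      · have hmem' : t ∈ rest.map Prod.fst := mem_fst_tail hp hmem
        obtain ⟨a1, a2⟩ := acc
        have hacc' : ∀ b, (selStep (fun ts => decide (ts ≤ t)) (a1, a2) p).1 = some b → b ≤ t := by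
          intro b hb
          cases a1 with
          | none =>
              simp only [selStep] at hb
              split at hb
              · rename_i hcond
                simp only [Bool.and_eq_true, decide_eq_true_eq] at hcond
                injection hb with hb'
                omega
              · exact hacc b hb
          | some b0 =>
              simp only [selStep] at hb
              split at hb
              · rename_i hcond
                simp only [Bool.and_eq_true, decide_eq_true_eq] at hcond
                injection hb with hb'
                omega
              · exact hacc b hb
        have := ih _ hacc' hmem'
        rw [selFold] at this ⊢
        rw [List.foldl_cons, this]
        simp [lastValD, hp]

lemma optLast_some (S : List (Int × Int)) (t d : Int) :
    optLast S t (some d) = some (lastValD S t d) := by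
  induction S generalizing d with
  | nil => rfl
  | cons p rest ih =>
      simp only [optLast, lastValD, List.foldl_cons] at *
      by_cases hp : p.1 = t <;> simp [hp, ih]

lemma optLast_mem (S : List (Int × Int)) (t : Int) (hmem : t ∈ S.map Prod.fst) (d : Int) :
    optLast S t none = some (lastValD S t d) := by
  induction S with
  | nil => simp at hmem
  | cons p rest ih =>
      simp only [optLast, lastValD, List.foldl_cons] at *
      by_cases hp : p.1 = t
      · simpa [hp] using optLast_some rest t p.2
      · have hmem' : t ∈ rest.map Prod.fst := mem_fst_tail hp hmem
        simpa [hp] using ih hmem'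

lemma optLast_none (S : List (Int × Int)) (t : Int) (hmem : t ∉ S.map Prod.fst) :
    optLast S t none = none := by
  induction S with
  | nil => rfl
  | cons p rest ih =>
      rw [List.map_cons] at hmem
      have hp : p.1 ≠ t := fun h => hmem (List.mem_cons.mpr (Or.inl h.symm))
      have hmem' : t ∉ rest.map Prod.fst := fun h => hmem (List.mem_cons.mpr (Or.inr h))
      simp only [optLast, List.foldl_cons]
      rw [if_neg hp]
      exact ih hmem'

lemma get?_foldl_insert (S : List (Int × Int)) (d : PySem.Dict Int Int) (t : Int) :
    (S.foldl (fun acc p => acc.insert p.1 p.2) d).get? t = optLast S t (d.get? t) := by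
  induction S generalizing d with
  | nil => rfl
  | cons p rest ih =>
      simp only [optLast, List.foldl_cons] at *
      rw [ih]
      congr 1
      rw [PySem.Dict.get?_insert]
      by_cases hp : p.1 = t
      · simp [hp]
      · rw [if_neg (show ¬ t = p.1 from fun h => hp h.symm), if_neg hp]

lemma get?_ofList (S : List (Int × Int)) (t : Int) :
    (PySem.Dict.ofList S).get? t = optLast S t none := by
  have := get?_foldl_insert S PySem.Dict.empty t
  simpa [PySem.Dict.ofList, PySem.Dict.update, PySem.Dict.get?_empty] using this

-- A's guarded dict update produces exactly Source B's val_at, given the carried value is the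
-- strictly-below-t value and t's side of the loop invariant.
lemma update_eq_valAt (S : List (Int × Int)) (t c : Int)
    (hc : c = (selFold S (fun ts => decide (ts < t)) (none, 0)).2) :
    (if (PySem.Dict.ofList S).contains t then ((PySem.Dict.ofList S).get? t).getD c else c)
      = pvValAt S t := by
  rw [pvValAt_eq_selFold]
  by_cases hmem : t ∈ S.map Prod.fst
  · have hget : (PySem.Dict.ofList S).get? t = some (lastValD S t 0) := by
      rw [get?_ofList]; exact optLast_mem S t hmem 0
    have hcont : (PySem.Dict.ofList S).contains t = true := by
      rw [PySem.Dict.contains_eq_isSome_get?, hget]; rfl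
    rw [hcont, if_pos rfl, hget]
    rw [selFold_mem S t (none, 0) (by simp) hmem]
    rfl
  · have hget : (PySem.Dict.ofList S).get? t = none := by
      rw [get?_ofList]; exact optLast_none S t hmem
    have hcont : (PySem.Dict.ofList S).contains t = false := by
      rw [PySem.Dict.contains_eq_isSome_get?, hget]; rfl
    rw [hcont]
    simp only [Bool.false_eq_true, if_false]
    have hcong : selFold S (fun ts => decide (ts ≤ t)) (none, 0)
        = selFold S (fun ts => decide (ts < t)) (none, 0) := by
      apply selFold_congr
      intro p hp
      have hne : p.1 ≠ t := fun h => hmem (List.mem_map.mpr ⟨p, hp, h⟩)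
      simp only [decide_eq_decide]
      omega
    rw [hc, hcong]

-- main loop invariant: A's fold over the remaining change points equals B's fold
lemma loop_eq (T1 T2 : List (Int × Int)) (r : List Int) (res : List (List Int))
    (c1 c2 : Int) (prev : Option Int)
    (hsort : r.Pairwise (· < ·))
    (hall : ∀ x ∈ T1.map Prod.fst ++ T2.map Prod.fst, x ∈ r ∨ ∀ y ∈ r, x < y)
    (hc1 : ∀ t rest, r = t :: rest → c1 = (selFold T1 (fun ts => decide (ts < t)) (none, 0)).2)
    (hc2 : ∀ t rest, r = t :: rest → c2 = (selFold T2 (fun ts => decide (ts < t)) (none, 0)).2)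
    (hprev : prev = (PySem.List.pyGet? res (-1)).bind (fun l => PySem.List.pyGet? l 1)) :
    (r.foldl (pvStepA (PySem.Dict.ofList T1) (PySem.Dict.ofList T2)) (res, c1, c2, prev)).1
      = r.foldl (pvStepB T1 T2) res := by
  induction r generalizing res c1 c2 prev with
  | nil => rfl
  | cons t rest ih =>
      have hpc := List.pairwise_cons.mp hsort
      have hhead : ∀ y ∈ rest, t < y := hpc.1
      have hsort' : rest.Pairwise (· < ·) := hpc.2
      have hallT1 : ∀ x ∈ T1.map Prod.fst, x ∈ t :: rest ∨ ∀ y ∈ t :: rest, x < y :=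
        fun x hx => hall x (List.mem_append.mpr (Or.inl hx))
      have hallT2 : ∀ x ∈ T2.map Prod.fst, x ∈ t :: rest ∨ ∀ y ∈ t :: rest, x < y :=
        fun x hx => hall x (List.mem_append.mpr (Or.inr hx))
      have hcv1 : (if (PySem.Dict.ofList T1).contains t then ((PySem.Dict.ofList T1).get? t).getD c1 else c1) = pvValAt T1 t :=
        update_eq_valAt T1 t c1 (hc1 t rest rfl)
      have hcv2 : (if (PySem.Dict.ofList T2).contains t then ((PySem.Dict.ofList T2).get? t).getD c2 else c2) = pvValAt T2 t :=
        update_eq_valAt T2 t c2 (hc2 t rest rfl)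
      have hstepA : pvStepA (PySem.Dict.ofList T1) (PySem.Dict.ofList T2) (res, c1, c2, prev) t
          = (if prev ≠ some (pvValAt T1 t + pvValAt T2 t)
             then (res ++ [[t, pvValAt T1 t + pvValAt T2 t]], pvValAt T1 t, pvValAt T2 t,
                   some (pvValAt T1 t + pvValAt T2 t))
             else (res, pvValAt T1 t, pvValAt T2 t, prev)) := by
        simp only [pvStepA]
        rw [hcv1, hcv2]
      -- the carried values for the next change point
      have key : ∀ (S : List (Int × Int)),
          (∀ x ∈ S.map Prod.fst, x ∈ t :: rest ∨ ∀ y ∈ t :: rest, x < y) →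
          ∀ t'' rest2, rest = t'' :: rest2 →
          pvValAt S t = (selFold S (fun ts => decide (ts < t'')) (none, 0)).2 := by
        intro S hS t'' rest2 hr
        have htlt : t < t'' := hhead t'' (by rw [hr]; exact List.mem_cons_self ..)
        rw [pvValAt_eq_selFold]
        have hcond : ∀ p ∈ S, (fun ts => decide (ts ≤ t)) p.1 = (fun ts => decide (ts < t'')) p.1 := by
          intro p hp
          have hx := hS p.1 (List.mem_map.mpr ⟨p, hp, rfl⟩)
          simp only [decide_eq_decide]
          rcases hx with hx | hx
          · rcases List.mem_cons.mp hx with h | h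
            · omega
            · rw [hr] at h
              rcases List.mem_cons.mp h with h2 | h2
              · omega
              · have h3 : t'' < p.1 := (List.pairwise_cons.mp (hr ▸ hsort')).1 p.1 h2
                omega
          · have h4 := hx t (List.mem_cons_self ..)
            omega
        rw [selFold_congr S (fun ts => decide (ts ≤ t)) (fun ts => decide (ts < t'')) (none, 0) hcond]
      have hall' : ∀ x ∈ T1.map Prod.fst ++ T2.map Prod.fst, x ∈ rest ∨ ∀ y ∈ rest, x < y := by
        intro x hx
        rcases hall x hx with h | h
        · rcases List.mem_cons.mp h with h2 | h2
          · right; intro y hy; rw [h2]; exact hhead y hy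
          · left; exact h2
        · right; intro y hy; exact h y (List.mem_cons_of_mem _ hy)
      rw [List.foldl_cons, List.foldl_cons, hstepA]
      cases hres : PySem.List.pyGet? res (-1) with
      | none =>
          have hprevn : prev = none := by rw [hprev, hres]; rfl
          have hcondA : prev ≠ some (pvValAt T1 t + pvValAt T2 t) := by
            rw [hprevn]; simp
          rw [if_pos hcondA]
          have hB : pvStepB T1 T2 res t = res ++ [[t, pvValAt T1 t + pvValAt T2 t]] := by
            simp only [pvStepB, hres]
          rw [hB]
          apply ih _ _ _ _ hsort' hall'
            (fun t'' r2 h => key T1 hallT1 t'' r2 h)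
            (fun t'' r2 h => key T2 hallT2 t'' r2 h)
          rw [PySem.List.pyGet?_neg_one_append_singleton]
          rfl
      | some l =>
          have hprevl : prev = PySem.List.pyGet? l 1 := by rw [hprev, hres]; rfl
          by_cases hne : PySem.List.pyGet? l 1 ≠ some (pvValAt T1 t + pvValAt T2 t)
          · rw [if_pos (by rw [hprevl]; exact hne)]
            have hB : pvStepB T1 T2 res t = res ++ [[t, pvValAt T1 t + pvValAt T2 t]] := by
              simp only [pvStepB, hres]
              rw [if_pos hne]
            rw [hB]
            apply ih _ _ _ _ hsort' hall'
              (fun t'' r2 h => key T1 hallT1 t'' r2 h)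
              (fun t'' r2 h => key T2 hallT2 t'' r2 h)
            rw [PySem.List.pyGet?_neg_one_append_singleton]
            rfl
          · rw [if_neg (by rw [hprevl]; exact hne)]
            have hB : pvStepB T1 T2 res t = res := by
              simp only [pvStepB, hres]
              rw [if_neg hne]
            rw [hB]
            exact ih _ _ _ _ hsort' hall'
              (fun t'' r2 h => key T1 hallT1 t'' r2 h)
              (fun t'' r2 h => key T2 hallT2 t'' r2 h)
              hprev

-- ===== VERDICT (by name: the statement is the Claim_ definition above) =====
theorem merge_timeseries_sum_spec : Claim_equal_merge_timeseries_sum := by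
  intro T1 T2 _
  unfold Spec_merge_timeseries_sum
  show merge_timeseries_sum T1 T2 = merge_timeseries_sum_alt T1 T2
  simp only [merge_timeseries_sum, merge_timeseries_sum_alt]
  have hsort := PySem.List.sorted_ofList_pairwise_lt (T1.map (fun p => p.1) ++ T2.map (fun p => p.1))
  apply loop_eq
  · exact hsort
  · intro x hx
    left
    rw [PySem.List.mem_sorted]
    exact (PySem.Set.mem_ofList _ _).mpr (by simpa using hx)
  · intro t rest hr
    rw [selFold_false T1 _ (none, 0)]
    intro p hp
    have hm : p.1 ∈ t :: rest := by
      rw [← hr, PySem.List.mem_sorted]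
      exact (PySem.Set.mem_ofList _ _).mpr
        (List.mem_append.mpr (Or.inl (List.mem_map.mpr ⟨p, hp, rfl⟩)))
    have hpair : (t :: rest).Pairwise (· < ·) := hr ▸ hsort
    have : ¬ p.1 < t := by
      rcases List.mem_cons.mp hm with h | h
      · omega
      · have := (List.pairwise_cons.mp hpair).1 p.1 h
        omega
    simp [this]
  · intro t rest hr
    rw [selFold_false T2 _ (none, 0)]
    intro p hp
    have hm : p.1 ∈ t :: rest := by
      rw [← hr, PySem.List.mem_sorted]
      exact (PySem.Set.mem_ofList _ _).mpr
        (List.mem_append.mpr (Or.inr (List.mem_map.mpr ⟨p, hp, rfl⟩)))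
    have hpair : (t :: rest).Pairwise (· < ·) := hr ▸ hsort
    have : ¬ p.1 < t := by
      rcases List.mem_cons.mp hm with h | h
      · omega
      · have := (List.pairwise_cons.mp hpair).1 p.1 h
        omega
    simp [this]
  · rfl
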